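-- pv_equiv track=rewrite | github.com/anushka21187/network_path_finder | available_ports.py | available_ports
-- ===== SOURCE A (Python) =====
-- def available_ports(topology, network):
--
--     available_directions = {}
--
--     if topology=='torus':
--         list_of_directions = ['N', 'S', 'W', 'E']
--         for row_index in range (0, len(network)):
--             for col_index in range (0, len(network[row_index])):
--                 available_directions[network[row_index][col_index]] = \
--                 list_of_directions
--
--     elif topology=='mesh':
--         for row_index in range (0, len(network)):
--             list_of_directions = []
--             # if this is the first row of the network matrix ...
--             if row_index==0:
--                 # then packets can definitely travel south
--                 list_of_directions.append('S')
--
--             # if this is the last row of the network matrix ...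
--             elif row_index==len(network)-1:
--                 # then packets can definitely travel north
--                 list_of_directions.append('N')
--
--             # if this is any other row of the network matrix ...
--             else:
--                 # then packets can definitely travel north and south
--                 list_of_directions.extend(['N', 'S'])
--
--             for col_index in range (0, len(network[row_index])):
--
--                 # and if this is the first column ...
--                 if col_index==0:
--                     # then packets can travel east but not west
--                     # so add east to the list
--                     list_of_directions.append('E')
--                     available_directions[network[row_index][col_index]] = []
--                     for i in range (0, len(list_of_directions)):
--                         available_directions[network[row_index][col_index]].append(list_of_directions[i])
--                     del(list_of_directions[-1])
--
--                 # or if this is the last column ...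
--                 elif col_index==len(network[row_index])-1:
--                     # then packets can only travel west but not east
--                     list_of_directions.append('W')
--                     available_directions[network[row_index][col_index]] = []
--                     for i in range (0, len(list_of_directions)):
--                         available_directions[network[row_index][col_index]].append(list_of_directions[i])
--                     del(list_of_directions[-1])
--                 # or if this node is in any other column ...
--                 else:
--                     # so add west and east to the list
--                     list_of_directions.extend(['W', 'E'])
--                     available_directions[network[row_index][col_index]] = []
--                     for i in range (0, len(list_of_directions)):
--                         available_directions[network[row_index][col_index]].append(list_of_directions[i])
--                     del(list_of_directions[-2:])
--
--     return available_directions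
-- ===== SOURCE B (Python) =====
-- def available_ports(topology, network):
--     result = {}
--     if topology == 'torus':
--         for row in network:
--             for node in row:
--                 result[node] = ['N', 'S', 'W', 'E']
--     elif topology == 'mesh':
--         for r, row in enumerate(network):
--             blocked = set()
--             if r == 0:
--                 blocked.add('N')
--             elif r == len(network) - 1:
--                 blocked.add('S')
--             for c, node in enumerate(row):
--                 if c == 0:
--                     cb = blocked | {'W'}
--                 elif c == len(row) - 1:
--                     cb = blocked | {'E'}
--                 else:
--                     cb = blocked
--                 result[node] = [d for d in ('N', 'S', 'W', 'E') if d not in cb]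
--     return result
-- ===== Notes on version B (the rewrite author's own statement) =====
-- stated objective: simpler
-- what changed: Instead of A's additive branch-per-border construction with a shared mutable direction list, append/copy/delete bookkeeping, B computes a per-cell blocked set from the row/column position and filters the fixed ['N','S','W','E'] order once per node.
import Mathlib
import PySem

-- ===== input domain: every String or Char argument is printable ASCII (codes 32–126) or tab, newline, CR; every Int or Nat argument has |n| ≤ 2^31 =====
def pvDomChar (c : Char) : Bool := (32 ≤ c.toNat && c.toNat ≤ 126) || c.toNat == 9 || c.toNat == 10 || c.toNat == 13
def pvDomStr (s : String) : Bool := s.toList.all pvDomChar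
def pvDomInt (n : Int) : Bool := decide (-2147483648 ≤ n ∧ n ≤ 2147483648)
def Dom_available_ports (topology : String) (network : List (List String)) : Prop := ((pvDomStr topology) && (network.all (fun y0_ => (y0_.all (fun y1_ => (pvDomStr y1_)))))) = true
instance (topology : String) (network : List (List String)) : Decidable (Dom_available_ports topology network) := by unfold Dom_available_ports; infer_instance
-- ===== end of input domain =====

-- B replaces A's additive border branches (shared mutable list + append/copy/delete) with a per-cell
-- blocked set filtered out of the fixed ["N","S","W","E"] order; A and B agree on all inputs (A is total).

-- ===== PORT A =====
-- the inner copy loop 'available[...] = []; for i in range(len(lod)): append lod[i]'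
def pvCopyA (l : List String) : List String := l.foldl (fun a x => a ++ [x]) []

-- one cell of A's mesh loop: state is (dict, list_of_directions); del lod[-1] = dropLast, del lod[-2:] = dropLast twice
def pvMeshCellA (rowLen : Int) (st : PySem.Dict String (List String) × List String)
    (q : Int × String) : PySem.Dict String (List String) × List String :=
  if q.1 = 0 then
    let lod2 := st.2 ++ ["E"]
    (st.1.insert q.2 (pvCopyA lod2), lod2.dropLast)
  else if q.1 = rowLen - 1 then
    let lod2 := st.2 ++ ["W"]
    (st.1.insert q.2 (pvCopyA lod2), lod2.dropLast)
  else
    let lod2 := st.2 ++ ["W", "E"]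
    (st.1.insert q.2 (pvCopyA lod2), lod2.dropLast.dropLast)

def available_ports (topology : String) (network : List (List String)) : List (String × List String) :=
  (if topology = "torus" then
    let list_of_directions := ["N", "S", "W", "E"]
    network.foldl (fun d row =>
      row.foldl (fun d node => d.insert node list_of_directions) d) PySem.Dict.empty
  else if topology = "mesh" then
    (PySem.List.enumerate network).foldl (fun d p =>
      let list_of_directions : List String :=
        if p.1 = 0 then ["S"]
        else if p.1 = (network.length : Int) - 1 then ["N"]
        else ["N", "S"]
      ((PySem.List.enumerate p.2).foldl (pvMeshCellA (p.2.length : Int))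
        (d, list_of_directions)).1) PySem.Dict.empty
  else PySem.Dict.empty).items

-- ===== PORT B =====
-- one cell of B's mesh loop: filter the fixed order by the per-cell blocked set
def pvMeshCellB (rowLen : Int) (blocked : List String)
    (d : PySem.Dict String (List String)) (q : Int × String) : PySem.Dict String (List String) :=
  let cb : List String :=
    if q.1 = 0 then PySem.Set.add blocked "W"
    else if q.1 = rowLen - 1 then PySem.Set.add blocked "E"
    else blocked
  d.insert q.2 (["N", "S", "W", "E"].filter (fun x => !(cb.contains x)))

def available_ports_alt (topology : String) (network : List (List String)) : List (String × List String) :=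
  (if topology = "torus" then
    network.foldl (fun d row =>
      row.foldl (fun d node => d.insert node ["N", "S", "W", "E"]) d) PySem.Dict.empty
  else if topology = "mesh" then
    (PySem.List.enumerate network).foldl (fun d p =>
      let blocked : List String :=
        if p.1 = 0 then PySem.Set.add [] "N"
        else if p.1 = (network.length : Int) - 1 then PySem.Set.add [] "S"
        else []
      (PySem.List.enumerate p.2).foldl (pvMeshCellB (p.2.length : Int) blocked) d) PySem.Dict.empty
  else PySem.Dict.empty).items

-- ===== PRECONDITION & SPEC =====
def Spec_available_ports (topology : String) (network : List (List String)) (out : List (String × List String)) : Prop := out = available_ports_alt topology network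
instance (topology : String) (network : List (List String)) (out : List (String × List String)) : Decidable (Spec_available_ports topology network out) := by unfold Spec_available_ports; infer_instance

-- ===== CLAIM (what is proved, stated in full; the proofs are below) =====
def Claim_equal_available_ports : Prop := ∀ (topology : String) (network : List (List String)), Dom_available_ports topology network → Spec_available_ports topology network (available_ports topology network)

-- ===== LEMMAS AND PROOFS =====

-- per cell: A's step keeps list_of_directions intact and inserts the same value B filters out,
-- for each of the three row-shapes of the pair (list_of_directions, blocked)
theorem pvCell_eq (rowLen : Int) (lod blocked : List String)
    (h : (lod = ["S"] ∧ blocked = ["N"]) ∨ (lod = ["N"] ∧ blocked = ["S"]) ∨ (lod = ["N", "S"] ∧ blocked = []))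
    (d : PySem.Dict String (List String)) (q : Int × String) :
    pvMeshCellA rowLen (d, lod) q = (pvMeshCellB rowLen blocked d q, lod) := by
  rcases h with ⟨h1, h2⟩ | ⟨h1, h2⟩ | ⟨h1, h2⟩ <;> subst h1 <;> subst h2 <;>
    simp only [pvMeshCellA, pvMeshCellB] <;> split_ifs <;> rfl

theorem pvRow_eq (rowLen : Int) (lod blocked : List String)
    (h : (lod = ["S"] ∧ blocked = ["N"]) ∨ (lod = ["N"] ∧ blocked = ["S"]) ∨ (lod = ["N", "S"] ∧ blocked = []))
    (l : List (Int × String)) (d : PySem.Dict String (List String)) :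
    l.foldl (pvMeshCellA rowLen) (d, lod) = (l.foldl (pvMeshCellB rowLen blocked) d, lod) := by
  induction l generalizing d with
  | nil => rfl
  | cons q t ih => simp only [List.foldl_cons, pvCell_eq rowLen lod blocked h d q, ih]

theorem pvMesh_eq (network : List (List String)) (L : List (Int × List String))
    (d : PySem.Dict String (List String)) :
    L.foldl (fun d p =>
      let list_of_directions : List String :=
        if p.1 = 0 then ["S"]
        else if p.1 = (network.length : Int) - 1 then ["N"]
        else ["N", "S"]
      ((PySem.List.enumerate p.2).foldl (pvMeshCellA (p.2.length : Int))
        (d, list_of_directions)).1) d =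
    L.foldl (fun d p =>
      let blocked : List String :=
        if p.1 = 0 then PySem.Set.add [] "N"
        else if p.1 = (network.length : Int) - 1 then PySem.Set.add [] "S"
        else []
      (PySem.List.enumerate p.2).foldl (pvMeshCellB (p.2.length : Int) blocked) d) d := by
  induction L generalizing d with
  | nil => rfl
  | cons p t ih =>
    simp only [List.foldl_cons]
    rw [ih]
    congr 1
    split_ifs with h0 h1
    · rw [pvRow_eq _ _ _ (Or.inl ⟨rfl, rfl⟩)]; rfl
    · rw [pvRow_eq _ _ _ (Or.inr (Or.inl ⟨rfl, rfl⟩))]; rfl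
    · rw [pvRow_eq _ _ _ (Or.inr (Or.inr ⟨rfl, rfl⟩))]

-- ===== VERDICT (by name: the statement is the Claim_ definition above) =====
theorem available_ports_spec : Claim_equal_available_ports := by
  intro topology network _
  unfold Spec_available_ports available_ports available_ports_alt
  split_ifs with h1 h2
  · rfl
  · rw [pvMesh_eq]
  · rfl
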